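-- pv_equiv track=rewrite | github.com/Arsen1302/Code-copy-detector | TestData/solutions/problem_1134_3.py | solution_1134_3
-- ===== SOURCE A (Python) =====
-- from typing import List
--
-- def solution_1134_3(nums: List[int], k: int) -> int:
--     sol = {}
--     cnt = 0
--
--     for el in nums:
--         if el < k:
--             if el in sol:
--                 sol[el] -= 1
--                 cnt += 1
--                 if sol[el] == 0:
--                     sol.pop(el)
--             else:
--                 sol[k-el] = sol.get(k-el, 0) + 1
--
--     return cnt
-- ===== SOURCE B (Python) =====
-- from typing import List
--
-- def solution_1134_3(nums: List[int], k: int) -> int: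
--     c = {}
--     for x in nums:
--         c[x] = c.get(x, 0) + 1
--     cnt = 0
--     for v, m in c.items():
--         w = k - v
--         if 0 < v < w:
--             cnt += min(m, c.get(w, 0))
--         elif 0 < v and v == w:
--             cnt += m // 2
--     return cnt
-- ===== Notes on version B (the rewrite author's own statement) =====
-- stated objective: alternative
-- what changed: A matches pair partners online with a dict of pending complements popped as elements stream by; B builds a frequency table once and then combines counts per distinct value (min(c[v], c[k-v]) for v < k-v, c[v]//2 for 2v == k).
import Mathlib
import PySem

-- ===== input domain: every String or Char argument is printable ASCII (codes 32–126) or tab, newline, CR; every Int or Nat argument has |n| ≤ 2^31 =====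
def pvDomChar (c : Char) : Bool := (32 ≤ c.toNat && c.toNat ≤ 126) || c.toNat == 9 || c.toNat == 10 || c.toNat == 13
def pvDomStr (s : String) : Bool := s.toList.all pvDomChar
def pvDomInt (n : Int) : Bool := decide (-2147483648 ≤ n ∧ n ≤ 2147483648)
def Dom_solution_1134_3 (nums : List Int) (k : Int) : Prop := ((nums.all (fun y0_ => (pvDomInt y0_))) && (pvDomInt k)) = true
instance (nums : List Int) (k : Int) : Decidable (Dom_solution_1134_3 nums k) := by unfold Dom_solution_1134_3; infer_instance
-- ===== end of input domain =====

-- B replaces A's online greedy dict-matching by a count-then-combine pass over a frequency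
-- table (one term per distinct value); same return value, different algorithm.


-- ===== PORT A =====
-- one iteration of A's for-loop; state = (sol, cnt)
def stepA_1134 (k : Int) (st : PySem.Dict Int Int × Int) (el : Int) : PySem.Dict Int Int × Int :=
  if el < k then
    if st.1.contains el then
      -- sol[el] -= 1 (el is present here, so get-then-set = overwrite insert); cnt += 1
      let sol1 := st.1.insert el (st.1.getD el 0 - 1)
      let cnt1 := st.2 + 1
      -- if sol[el] == 0: sol.pop(el)
      if sol1.getD el 0 = 0 then (sol1.erase el, cnt1) else (sol1, cnt1)
    else (st.1.insert (k - el) (st.1.getD (k - el) 0 + 1), st.2)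
  else st

def solution_1134_3 (nums : List Int) (k : Int) : Int :=
  (nums.foldl (stepA_1134 k) (PySem.Dict.empty, 0)).2

-- ===== PORT B =====
-- one iteration of B's loop over the counter's items
def stepB_1134 (c : PySem.Dict Int Int) (k : Int) (cnt : Int) (p : Int × Int) : Int :=
  let v := p.1
  let m := p.2
  let w := k - v
  if 0 < v ∧ v < w then cnt + min m (c.getD w 0)
  else if 0 < v ∧ v = w then cnt + PySem.Int.floordiv m 2
  else cnt

def solution_1134_3_alt (nums : List Int) (k : Int) : Int :=
  let c := nums.foldl (fun d x => d.insert x (d.getD x 0 + 1)) PySem.Dict.empty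
  c.items.foldl (stepB_1134 c k) 0

-- ===== PRECONDITION & SPEC =====
def Spec_solution_1134_3 (nums : List Int) (k : Int) (out : Int) : Prop := out = solution_1134_3_alt nums k
instance (nums : List Int) (k : Int) (out : Int) : Decidable (Spec_solution_1134_3 nums k out) := by unfold Spec_solution_1134_3; infer_instance

-- ===== CLAIM (what is proved, stated in full; the proofs are below) =====
def Claim_equal_solution_1134_3 : Prop := ∀ (nums : List Int) (k : Int), Dom_solution_1134_3 nums k → Spec_solution_1134_3 nums k (solution_1134_3 nums k)

-- ===== LEMMAS AND PROOFS =====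

-- contribution of a distinct value v to the final count, under counts c
def contrib1134 (k : Int) (c : Int → Int) (v : Int) : Int :=
  if 0 < v ∧ v < k - v then min (c v) (c (k - v))
  else if 0 < v ∧ v = k - v then c v / 2
  else 0

-- total over an index list of distinct values
def MS1134 (k : Int) (D : List Int) (c : Int → Int) : Int := (D.map (contrib1134 k c)).sum

-- pending unmatched demand A's dict stores at a key, under counts c of the processed prefix
def pend1134 (k : Int) (c : Int → Int) (key : Int) : Int :=
  if key ≤ 0 then 0
  else if k ≤ key then c (k - key)
  else if 2 * key = k then c key % 2
  else max (c (k - key) - c key) 0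

-- counts after one more element x
def cb1134 (c : Int → Int) (x : Int) : Int → Int := fun v => if v = x then c v + 1 else c v

-- 1 iff A's loop body increments cnt on element x (state described by c)
def ind1134 (k : Int) (c : Int → Int) (x : Int) : Int :=
  if x < k ∧ 0 < pend1134 k c x then 1 else 0

-- A's dict is exactly pend1134: present iff positive, value = the pending demand
def Inv1134 (k : Int) (c : Int → Int) (sol : PySem.Dict Int Int) : Prop :=
  ∀ key : Int, sol.get? key =
    if 0 < pend1134 k c key then some (pend1134 k c key) else none

theorem find?_filter_none_1134 (l : List (Int × Int)) (k : Int) :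
    (l.filter (fun p => !(p.1 == k))).find? (fun p => p.1 == k) = none :=
  List.find?_eq_none.mpr (fun q hq => by simpa using List.of_mem_filter hq)

theorem find?_filter_ne_1134 (l : List (Int × Int)) (k j : Int) (h : ¬ j = k) :
    (l.filter (fun p => !(p.1 == k))).find? (fun p => p.1 == j) =
      l.find? (fun p => p.1 == j) := by
  induction l with
  | nil => rfl
  | cons p l ih =>
    by_cases hpk : p.1 = k
    · rw [List.filter_cons_of_neg (by simp [hpk]),
        List.find?_cons_of_neg (by simp [hpk]; omega), ih]
    · rw [List.filter_cons_of_pos (by simp [hpk])]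
      by_cases hpj : p.1 = j
      · rw [List.find?_cons_of_pos (by simp [hpj]), List.find?_cons_of_pos (by simp [hpj])]
      · rw [List.find?_cons_of_neg (by simp [hpj]), List.find?_cons_of_neg (by simp [hpj]), ih]

theorem get?_erase_1134 (d : PySem.Dict Int Int) (k j : Int) :
    (d.erase k).get? j = if j = k then none else d.get? j := by
  obtain ⟨l⟩ := d
  show Option.map _ (List.find? _ (List.filter _ l)) = _
  split_ifs with hjk
  · subst hjk; rw [find?_filter_none_1134]; rfl
  · rw [find?_filter_ne_1134 l k j hjk]; rfl

theorem pend1134_nonneg (k : Int) (c : Int → Int) (key : Int) (hc : ∀ v, 0 ≤ c v) :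
    0 ≤ pend1134 k c key := by
  unfold pend1134; have h1 := hc (k - key); have h2 := hc key
  split_ifs <;> omega

theorem pend1134_pos_pos (k : Int) (c : Int → Int) (x : Int) (h : 0 < pend1134 k c x) :
    0 < x := by
  by_contra hx
  have : pend1134 k c x = 0 := by unfold pend1134; split_ifs <;> omega
  omega

theorem getD_eq_pend1134 (k : Int) (c : Int → Int) (sol : PySem.Dict Int Int)
    (hInv : Inv1134 k c sol) (hc : ∀ v, 0 ≤ c v) (key : Int) :
    sol.getD key 0 = pend1134 k c key := by
  have h := hInv key
  have hn := pend1134_nonneg k c key hc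
  rw [PySem.Dict.getD_eq_get?_getD, h]
  split_ifs <;> simp <;> omega

theorem contains_iff_pend1134 (k : Int) (c : Int → Int) (sol : PySem.Dict Int Int)
    (hInv : Inv1134 k c sol) (key : Int) :
    sol.contains key = true ↔ 0 < pend1134 k c key := by
  rw [PySem.Dict.contains_eq_isSome_get?, hInv key]
  split_ifs with h <;> simp [h]

-- how pend1134 moves when the count of x is bumped: matched element
theorem pend1134_cb_matched (k x : Int) (c : Int → Int) (hc : ∀ v, 0 ≤ c v)
    (hx : x < k) (hm : 0 < pend1134 k c x) :
    ∀ key, pend1134 k (cb1134 c x) key =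
      if key = x then pend1134 k c x - 1 else pend1134 k c key := by
  have hx0 : 0 < x := pend1134_pos_pos k c x hm
  intro key
  have hp := hm
  have h2 := hc (k - x); have h4 := hc x
  by_cases h1 : key = x
  · subst h1
    simp only [pend1134, cb1134] at hp ⊢
    split_ifs at hp ⊢ <;> omega
  · by_cases h2' : key = k - x
    · subst h2'
      simp only [pend1134, cb1134, sub_sub_cancel] at hp ⊢
      split_ifs at hp ⊢ <;> omega
    · have h5 := hc key; have h6 := hc (k - key)
      simp only [pend1134, cb1134] at hp ⊢
      split_ifs at hp ⊢ <;> omega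

-- unmatched element: demand at k - x grows by one
theorem pend1134_cb_unmatched (k x : Int) (c : Int → Int) (hc : ∀ v, 0 ≤ c v)
    (hx : x < k) (hm : pend1134 k c x = 0) :
    ∀ key, pend1134 k (cb1134 c x) key =
      if key = k - x then pend1134 k c (k - x) + 1 else pend1134 k c key := by
  intro key
  have hp := hm
  have h2 := hc (k - x); have h4 := hc x
  by_cases h1 : key = k - x
  · subst h1
    simp only [pend1134, cb1134, sub_sub_cancel] at hp ⊢
    by_cases hxx : k - x = x
    · simp only [hxx] at hp ⊢
      split_ifs at hp ⊢ <;> omega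
    · split_ifs at hp ⊢ <;> omega
  · by_cases h2' : key = x
    · subst h2'
      simp only [pend1134, cb1134] at hp ⊢
      split_ifs at hp ⊢ <;> omega
    · have h5 := hc key; have h6 := hc (k - key)
      simp only [pend1134, cb1134] at hp ⊢
      split_ifs at hp ⊢ <;> omega

-- element ≥ k: no pending value reads its count
theorem pend1134_cb_big (k x : Int) (c : Int → Int) (hc : ∀ v, 0 ≤ c v) (hx : ¬ x < k) :
    ∀ key, pend1134 k (cb1134 c x) key = pend1134 k c key := by
  intro key
  have h2 := hc (k - x); have h4 := hc x
  by_cases h1 : key = x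
  · subst h1
    simp only [pend1134, cb1134]
    split_ifs <;> omega
  · by_cases h2' : key = k - x
    · subst h2'
      simp only [pend1134, cb1134, sub_sub_cancel]
      split_ifs <;> omega
    · have h5 := hc key; have h6 := hc (k - key)
      simp only [pend1134, cb1134]
      split_ifs <;> omega

-- cnt component of one step
theorem stepA_cnt_1134 (k x : Int) (st : PySem.Dict Int Int × Int) (c : Int → Int)
    (hInv : Inv1134 k c st.1) :
    (stepA_1134 k st x).2 = st.2 + ind1134 k c x := by
  unfold stepA_1134 ind1134
  by_cases hx : x < k
  · by_cases hm : 0 < pend1134 k c x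
    · have hcont : st.1.contains x = true := (contains_iff_pend1134 k c st.1 hInv x).mpr hm
      simp only [hx, if_true, hcont]
      split_ifs <;> simp_all
    · have hcont : st.1.contains x = false := by
        rcases Bool.eq_false_or_eq_true (st.1.contains x) with h | h
        · exact absurd ((contains_iff_pend1134 k c st.1 hInv x).mp h) hm
        · exact h
      simp [hx, hcont, hm]
  · simp [hx]

-- invariant preservation
theorem stepA_inv_1134 (k x : Int) (st : PySem.Dict Int Int × Int) (c : Int → Int)
    (hInv : Inv1134 k c st.1) (hc : ∀ v, 0 ≤ c v) :
    Inv1134 k (cb1134 c x) (stepA_1134 k st x).1 := by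
  by_cases hx : x < k
  · by_cases hm : 0 < pend1134 k c x
    · -- matched branch: pending at x drops by one, all other keys unchanged
      have hcont : st.1.contains x = true := (contains_iff_pend1134 k c st.1 hInv x).mpr hm
      have hgd : st.1.getD x 0 = pend1134 k c x := getD_eq_pend1134 k c st.1 hInv hc x
      have hgd1 : (st.1.insert x (pend1134 k c x - 1)).getD x 0 = pend1134 k c x - 1 := by
        rw [PySem.Dict.getD_insert]; simp
      intro key
      unfold stepA_1134
      simp only [hx, if_true, hcont, hgd, pend1134_cb_matched k x c hc hx hm key]
      by_cases hk : key = x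
      · subst hk
        by_cases hz : pend1134 k c key - 1 = 0
        · rw [if_pos (by rw [hgd1]; exact hz)]
          dsimp only
          rw [get?_erase_1134, if_pos rfl, if_pos rfl, if_neg (by omega)]
        · rw [if_neg (by rw [hgd1]; exact hz)]
          dsimp only
          rw [PySem.Dict.get?_insert_self, if_pos rfl,
            if_pos (by have := pend1134_nonneg k c key hc; omega)]
      · have hne : (st.1.insert x (pend1134 k c x - 1)).get? key = st.1.get? key :=
          PySem.Dict.get?_insert_of_ne st.1 _ hk
        rw [if_neg hk]
        by_cases hz : (st.1.insert x (pend1134 k c x - 1)).getD x 0 = 0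
        · rw [if_pos hz]
          show ((st.1.insert x (pend1134 k c x - 1)).erase x).get? key = _
          rw [get?_erase_1134, if_neg hk, hne, hInv key]
        · rw [if_neg hz]
          show (st.1.insert x (pend1134 k c x - 1)).get? key = _
          rw [hne, hInv key]
    · -- unmatched branch: demand at k - x gains one, all other keys unchanged
      have hcont : st.1.contains x = false := by
        rcases Bool.eq_false_or_eq_true (st.1.contains x) with h | h
        · exact absurd ((contains_iff_pend1134 k c st.1 hInv x).mp h) hm
        · exact h
      have hp0 : pend1134 k c x = 0 := by
        have := pend1134_nonneg k c x hc; omega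
      have hgd : st.1.getD (k - x) 0 = pend1134 k c (k - x) :=
        getD_eq_pend1134 k c st.1 hInv hc (k - x)
      have hpos : 0 < pend1134 k c (k - x) + 1 := by
        have := pend1134_nonneg k c (k - x) hc; omega
      intro key
      unfold stepA_1134
      simp only [hx, if_true, hcont, Bool.false_eq_true, if_false, hgd,
        pend1134_cb_unmatched k x c hc hx hp0 key]
      by_cases hk : key = k - x
      · subst hk; rw [if_pos rfl, PySem.Dict.get?_insert_self, if_pos hpos]
      · rw [if_neg hk, PySem.Dict.get?_insert_of_ne st.1 _ hk, hInv key]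
  · -- x ≥ k: state untouched and no pending value reads c at x
    intro key
    unfold stepA_1134
    simp only [hx, if_false, pend1134_cb_big k x c hc hx key]
    exact hInv key

-- sum over a Nodup list of two functions agreeing off one point
theorem sum_map_sub_single_1134 (f g : Int → Int) (D : List Int) (hnd : D.Nodup) (o : Int)
    (h : ∀ v, v ≠ o → f v = g v) :
    (D.map f).sum = (D.map g).sum + (if o ∈ D then f o - g o else 0) := by
  induction D with
  | nil => simp
  | cons d D ih =>
    rcases List.nodup_cons.mp hnd with ⟨hdD, hnd'⟩
    by_cases hdo : d = o
    · subst hdo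
      have : (D.map f) = (D.map g) := by
        apply List.map_congr_left
        intro v hv; exact h v (fun hvo => hdD (hvo ▸ hv))
      simp [this, List.mem_cons]
      ring
    · rw [List.map_cons, List.map_cons, List.sum_cons, List.sum_cons, h d hdo, ih hnd']
      by_cases hoD : o ∈ D
      · rw [if_pos hoD, if_pos (List.mem_cons_of_mem _ hoD)]
        ring
      · rw [if_neg hoD, if_neg (by
          intro hor
          rcases List.mem_cons.mp hor with h' | h'
          · exact hdo h'.symm
          · exact hoD h')]
        ring

theorem MS1134_congr (k : Int) (D : List Int) (c1 c2 : Int → Int)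
    (h : ∀ v, c1 v = c2 v) : MS1134 k D c1 = MS1134 k D c2 := by
  unfold MS1134
  congr 1
  apply List.map_congr_left
  intro v _
  unfold contrib1134
  rw [h v, h (k - v)]

-- the sum moves exactly with A's per-element increment
theorem MS1134_step (k x : Int) (D : List Int) (hnd : D.Nodup) (hxD : x ∈ D)
    (c : Int → Int) (hsupp : ∀ v, v ∉ D → c v = 0) (hc : ∀ v, 0 ≤ c v) :
    MS1134 k D (cb1134 c x) = MS1134 k D c + ind1134 k c x := by
  have h2 := hc (k - x); have h4 := hc x
  by_cases hact : 0 < x ∧ x < k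
  · -- active element: exactly the term owned by min(x, k-x) moves
    by_cases hlt : k - x < x
    · -- owner is k - x
      have hoff : ∀ v, v ≠ k - x → contrib1134 k (cb1134 c x) v = contrib1134 k c v := by
        intro v hv
        have h5 := hc v; have h6 := hc (k - v)
        by_cases h1 : v = x
        · subst h1
          simp only [contrib1134, cb1134]
          split_ifs <;> omega
        · simp only [contrib1134, cb1134]
          split_ifs <;> omega
      rw [MS1134, MS1134, sum_map_sub_single_1134 _ _ D hnd (k - x) hoff]
      by_cases hoD : (k - x) ∈ D
      · rw [if_pos hoD]
        have : contrib1134 k (cb1134 c x) (k - x) - contrib1134 k c (k - x) =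
            ind1134 k c x := by
          simp only [contrib1134, cb1134, ind1134, pend1134, sub_sub_cancel]
          split_ifs <;> omega
        omega
      · rw [if_neg hoD]
        have hc0 : c (k - x) = 0 := hsupp _ hoD
        have : ind1134 k c x = 0 := by
          simp only [ind1134, pend1134]
          split_ifs <;> omega
        omega
    · -- owner is x itself
      have hoff : ∀ v, v ≠ x → contrib1134 k (cb1134 c x) v = contrib1134 k c v := by
        intro v hv
        have h5 := hc v; have h6 := hc (k - v)
        by_cases h1 : v = k - x
        · subst h1
          simp only [contrib1134, cb1134, sub_sub_cancel]
          split_ifs <;> omega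
        · simp only [contrib1134, cb1134]
          split_ifs <;> omega
      rw [MS1134, MS1134, sum_map_sub_single_1134 _ _ D hnd x hoff, if_pos hxD]
      have : contrib1134 k (cb1134 c x) x - contrib1134 k c x = ind1134 k c x := by
        simp only [contrib1134, cb1134, ind1134, pend1134]
        split_ifs <;> omega
      omega
  · -- inactive element: no term of the sum reads c at x
    have heq : ∀ v, v ∈ D → contrib1134 k (cb1134 c x) v = contrib1134 k c v := by
      intro v _
      have h5 := hc v; have h6 := hc (k - v)
      by_cases h1 : v = x
      · subst h1
        simp only [contrib1134, cb1134]
        split_ifs <;> omega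
      · by_cases h2' : v = k - x
        · subst h2'
          simp only [contrib1134, cb1134, sub_sub_cancel]
          split_ifs <;> omega
        · simp only [contrib1134, cb1134]
          split_ifs <;> omega
    have hMS : MS1134 k D (cb1134 c x) = MS1134 k D c := by
      unfold MS1134; congr 1; exact List.map_congr_left heq
    have hind : ind1134 k c x = 0 := by
      simp only [ind1134, pend1134]
      split_ifs <;> omega
    omega

-- main loop invariant for A
theorem loopA_cnt_1134 (k : Int) (D : List Int) (hnd : D.Nodup) :
    ∀ (xs : List Int) (sol : PySem.Dict Int Int) (cnt : Int) (c : Int → Int),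
      (∀ x ∈ xs, x ∈ D) → (∀ v, v ∉ D → c v = 0) → (∀ v, 0 ≤ c v) →
      Inv1134 k c sol →
      (xs.foldl (stepA_1134 k) (sol, cnt)).2 =
        cnt + MS1134 k D (fun v => c v + (xs.count v : Int)) - MS1134 k D c := by
  intro xs
  induction xs with
  | nil =>
    intro sol cnt c _ _ _ _
    rw [MS1134_congr k D (fun v => c v + (([] : List Int).count v : Int)) c
      (by intro v; simp)]
    simp
  | cons x xs ih =>
    intro sol cnt c hmem hsupp hc hInv
    have hx : x ∈ D := hmem x (List.mem_cons_self ..)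
    rw [List.foldl_cons]
    have hpair : stepA_1134 k (sol, cnt) x =
        ((stepA_1134 k (sol, cnt) x).1, (stepA_1134 k (sol, cnt) x).2) := rfl
    rw [hpair, ih (stepA_1134 k (sol, cnt) x).1 (stepA_1134 k (sol, cnt) x).2 (cb1134 c x)
      (fun y hy => hmem y (List.mem_cons_of_mem _ hy))
      (by
        intro v hv
        have hvx : ¬ v = x := by intro h; rw [h] at hv; exact hv hx
        simp only [cb1134, if_neg hvx]
        exact hsupp v hv)
      (by intro v; unfold cb1134; have := hc v; split_ifs <;> omega)
      (stepA_inv_1134 k x (sol, cnt) c hInv hc)]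
    rw [stepA_cnt_1134 k x (sol, cnt) c hInv]
    rw [MS1134_step k x D hnd hx c hsupp hc]
    rw [MS1134_congr k D (fun v => cb1134 c x v + (xs.count v : Int))
      (fun v => c v + (((x :: xs).count v : Nat) : Int))
      (by
        intro v
        dsimp only
        simp only [cb1134, List.count_cons]
        push_cast
        by_cases h : v = x
        · subst h
          simp
          omega
        · have hb : (x == v) = false := beq_eq_false_iff_ne.mpr (Ne.symm h)
          simp [h, hb])]
    omega

theorem pend1134_zero (k key : Int) : pend1134 k (fun _ => 0) key = 0 := by
  unfold pend1134; split_ifs <;> simp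

theorem MS1134_zerofun (k : Int) (D : List Int) : MS1134 k D (fun _ => 0) = 0 := by
  unfold MS1134
  have : D.map (contrib1134 k (fun _ => 0)) = D.map (fun _ => (0 : Int)) := by
    apply List.map_congr_left
    intro v _
    unfold contrib1134
    split_ifs <;> simp
  simp [this]

-- A computes MS1134 over the distinct values with the full counts
theorem solA_eq_MS_1134 (nums : List Int) (k : Int) :
    solution_1134_3 nums k =
      MS1134 k (PySem.Set.ofList nums) (fun v => (nums.count v : Int)) := by
  unfold solution_1134_3
  rw [loopA_cnt_1134 k (PySem.Set.ofList nums) (PySem.Set.nodup_ofList nums) nums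
    PySem.Dict.empty 0 (fun _ => 0)
    (fun x hx => (PySem.Set.mem_ofList nums x).mpr hx)
    (fun _ _ => rfl) (fun _ => le_refl 0)
    (by
      intro key
      rw [pend1134_zero]
      simp [PySem.Dict.get?_empty])]
  rw [MS1134_zerofun]
  rw [MS1134_congr k _ (fun v => (0 : Int) + (nums.count v : Int))
    (fun v => (nums.count v : Int)) (by intro v; dsimp only; omega)]
  omega

-- B's per-item term
def termB_1134 (c : PySem.Dict Int Int) (k : Int) (p : Int × Int) : Int :=
  if 0 < p.1 ∧ p.1 < k - p.1 then min p.2 (c.getD (k - p.1) 0)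
  else if 0 < p.1 ∧ p.1 = k - p.1 then PySem.Int.floordiv p.2 2
  else 0

theorem foldl_stepB_1134 (c : PySem.Dict Int Int) (k : Int) :
    ∀ (l : List (Int × Int)) (a : Int),
      l.foldl (stepB_1134 c k) a = a + (l.map (termB_1134 c k)).sum := by
  intro l
  induction l with
  | nil => intro a; simp
  | cons p l ih =>
    intro a
    rw [List.foldl_cons, ih]
    have : stepB_1134 c k a p = a + termB_1134 c k p := by
      simp only [stepB_1134, termB_1134]
      by_cases h1 : 0 < p.1 ∧ p.1 < k - p.1
      · rw [if_pos h1, if_pos h1]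
      · rw [if_neg h1, if_neg h1]
        by_cases h2 : 0 < p.1 ∧ p.1 = k - p.1
        · rw [if_pos h2, if_pos h2]
        · rw [if_neg h2, if_neg h2]
          ring
    rw [this, List.map_cons, List.sum_cons]
    ring

-- B computes the same sum
theorem solB_eq_MS_1134 (nums : List Int) (k : Int) :
    solution_1134_3_alt nums k =
      MS1134 k (PySem.Set.ofList nums) (fun v => (nums.count v : Int)) := by
  unfold solution_1134_3_alt
  rw [PySem.Dict.foldl_insert_getD_add_one_eq_counter]
  show (PySem.Dict.counter nums).items.foldl (stepB_1134 (PySem.Dict.counter nums) k) 0 = _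
  rw [PySem.Dict.items_counter, foldl_stepB_1134]
  rw [List.map_map]
  unfold MS1134
  have : ((PySem.Set.ofList nums).map
        (termB_1134 (PySem.Dict.counter nums) k ∘ fun v => (v, (nums.count v : Int)))) =
      (PySem.Set.ofList nums).map (contrib1134 k (fun v => (nums.count v : Int))) := by
    apply List.map_congr_left
    intro v _
    show termB_1134 (PySem.Dict.counter nums) k (v, (nums.count v : Int)) = _
    unfold termB_1134 contrib1134
    rw [PySem.Dict.getD_counter, PySem.Int.floordiv_eq_ediv_of_pos (by norm_num)]
  rw [this]
  ring

-- ===== VERDICT (by name: the statement is the Claim_ definition above) =====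
theorem solution_1134_3_spec : Claim_equal_solution_1134_3 := by
  intro nums k _
  unfold Spec_solution_1134_3
  rw [solA_eq_MS_1134, solB_eq_MS_1134]
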